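-- pv_equiv track=rewrite | github.com/waynejing995/autoresearch-x | src/autoresearch_x/program_parser.py | _extract_evaluation
-- ===== SOURCE A (Python) =====
-- def _extract_evaluation(text: str) -> tuple[str, str, str]:
--     eval_command = ""
--     metric_name = ""
--     target = ""
--     in_eval = False
--     for line in text.split("\n"):
--         stripped = line.strip()
--         if stripped.startswith("## Evaluation"):
--             in_eval = True
--             continue
--         if in_eval and stripped.startswith("## "):
--             break
--         if not in_eval:
--             continue
--         if stripped.startswith("- command:"):
--             val = stripped[len("- command:"):].strip()
--             eval_command = val.strip("`")
--         elif stripped.startswith("- metric:"):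
--             metric_name = stripped[len("- metric:"):].strip()
--         elif stripped.startswith("- target:"):
--             target = stripped[len("- target:"):].strip()
--     return eval_command, metric_name, target
-- ===== SOURCE B (Python) =====
-- def _extract_evaluation(text: str) -> tuple[str, str, str]:
--     # Different decomposition: strip once, locate the "## Evaluation" header,
--     # slice out the section block, then parse the block (last occurrence wins).
--     strips = [line.strip() for line in text.split("\n")]
--     i = 0
--     n = len(strips)
--     while i < n and not strips[i].startswith("## Evaluation"):
--         i += 1
--     if i == n:
--         return "", "", ""
--     block = []
--     for s in strips[i + 1:]:
--         if s.startswith("## ") and not s.startswith("## Evaluation"):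
--             break
--         block.append(s)
--     cmd, metric, target = "", "", ""
--     for s in block:
--         if s.startswith("- command:"):
--             cmd = s[len("- command:"):].strip().strip("`")
--         elif s.startswith("- metric:"):
--             metric = s[len("- metric:"):].strip()
--         elif s.startswith("- target:"):
--             target = s[len("- target:"):].strip()
--     return cmd, metric, target
-- ===== Notes on version B (the rewrite author's own statement) =====
-- stated objective: alternative
-- what changed: Replaces the in_eval state-flag loop with explicit phases: strip all lines once, locate the first '## Evaluation' header, slice the section block up to the next other '## ' header, then parse only the block lines.
import Mathlib
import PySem

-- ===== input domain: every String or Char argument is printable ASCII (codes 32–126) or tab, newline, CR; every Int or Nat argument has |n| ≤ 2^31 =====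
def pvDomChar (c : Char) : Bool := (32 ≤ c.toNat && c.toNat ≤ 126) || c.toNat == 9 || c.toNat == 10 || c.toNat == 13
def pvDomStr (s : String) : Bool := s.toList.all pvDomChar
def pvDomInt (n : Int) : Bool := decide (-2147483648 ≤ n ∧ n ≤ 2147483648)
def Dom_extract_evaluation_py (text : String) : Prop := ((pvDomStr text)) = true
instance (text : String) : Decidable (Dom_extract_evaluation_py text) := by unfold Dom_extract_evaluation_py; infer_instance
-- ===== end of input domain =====

-- B replaces A's in_eval state-flag loop with explicit phases (strip, locate header, slice block, parse block); same value, same cost.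

-- ===== PORT A =====
-- A's loop over text.split("\n") with state (eval_command, metric_name, target, in_eval);
-- the `break` is the (c, m, t) early return.
def pvAuxA : List String → String → String → String → Bool → String × String × String
  | [], c, m, t, _ => (c, m, t)
  | l :: rest, c, m, t, inEval =>
    let stripped := PySem.Str.strip l
    if PySem.Str.startswith stripped "## Evaluation" then
      pvAuxA rest c m t true
    else if inEval && PySem.Str.startswith stripped "## " then
      (c, m, t)
    else if !inEval then
      pvAuxA rest c m t inEval
    else if PySem.Str.startswith stripped "- command:" then
      pvAuxA rest (PySem.Str.stripChars (PySem.Str.strip (PySem.Str.slice stripped (some 10) none)) "`") m t inEval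
    else if PySem.Str.startswith stripped "- metric:" then
      pvAuxA rest c (PySem.Str.strip (PySem.Str.slice stripped (some 9) none)) t inEval
    else if PySem.Str.startswith stripped "- target:" then
      pvAuxA rest c m (PySem.Str.strip (PySem.Str.slice stripped (some 9) none)) inEval
    else
      pvAuxA rest c m t inEval

-- split? is `some` because the separator "\n" is nonempty
def extract_evaluation_py (text : String) : String × String × String :=
  pvAuxA ((PySem.Str.split? text "\n").getD []) "" "" "" false

-- ===== PORT B =====
-- B's while loop: skip stripped lines until the first "## Evaluation" header, return what follows it
def pvFindRest : List String → Option (List String)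
  | [] => none
  | s :: rest => if PySem.Str.startswith s "## Evaluation" then some rest else pvFindRest rest

-- B's block loop: collect stripped lines, stopping (break) at the next other "## " header
def pvTakeBlock : List String → List String
  | [] => []
  | s :: rest =>
    if PySem.Str.startswith s "## " && !PySem.Str.startswith s "## Evaluation" then []
    else s :: pvTakeBlock rest

-- B's parse loop body (lines are already stripped)
def pvParse (acc : String × String × String) (s : String) : String × String × String :=
  if PySem.Str.startswith s "- command:" then
    (PySem.Str.stripChars (PySem.Str.strip (PySem.Str.slice s (some 10) none)) "`", acc.2.1, acc.2.2)
  else if PySem.Str.startswith s "- metric:" then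
    (acc.1, PySem.Str.strip (PySem.Str.slice s (some 9) none), acc.2.2)
  else if PySem.Str.startswith s "- target:" then
    (acc.1, acc.2.1, PySem.Str.strip (PySem.Str.slice s (some 9) none))
  else acc

def extract_evaluation_py_alt (text : String) : String × String × String :=
  let strips := ((PySem.Str.split? text "\n").getD []).map PySem.Str.strip
  match pvFindRest strips with
  | none => ("", "", "")
  | some rest => (pvTakeBlock rest).foldl pvParse ("", "", "")

-- ===== PRECONDITION & SPEC =====
def Spec_extract_evaluation_py (text : String) (out : String × String × String) : Prop := out = extract_evaluation_py_alt text
instance (text : String) (out : String × String × String) : Decidable (Spec_extract_evaluation_py text out) := by unfold Spec_extract_evaluation_py; infer_instance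

-- ===== CLAIM (what is proved, stated in full; the proofs are below) =====
def Claim_equal_extract_evaluation_py : Prop := ∀ (text : String), Dom_extract_evaluation_py text → Spec_extract_evaluation_py text (extract_evaluation_py text)

-- ===== LEMMAS AND PROOFS =====

-- two string literals neither of which is a prefix of the other cannot both be prefixes of s
theorem pv_starts_excl (s p q : String) (h : PySem.Str.startswith s p = true)
    (hne : ¬ (p.toList <+: q.toList) ∧ ¬ (q.toList <+: p.toList)) :
    PySem.Str.startswith s q = false := by
  by_contra hq
  rw [Bool.not_eq_false] at hq
  simp only [PySem.Str.startswith_eq, PySem.Chars.startswith_iff] at h hq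
  rcases List.prefix_or_prefix_of_prefix h hq with h' | h'
  · exact hne.1 h'
  · exact hne.2 h'

-- a "## Evaluation" line matches none of the "- …:" patterns, so pvParse leaves the state alone
theorem pvParse_header (s : String) (h : PySem.Str.startswith s "## Evaluation" = true)
    (acc : String × String × String) : pvParse acc s = acc := by
  unfold pvParse
  rw [pv_starts_excl s _ "- command:" h (by decide),
      pv_starts_excl s _ "- metric:" h (by decide),
      pv_starts_excl s _ "- target:" h (by decide)]
  simp

-- inside the section, A's state machine is B's block fold
theorem pv_eval_phase (ls : List String) (c m t : String) :
    pvAuxA ls c m t true = (pvTakeBlock (ls.map PySem.Str.strip)).foldl pvParse (c, m, t) := by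
  induction ls generalizing c m t with
  | nil => rfl
  | cons l rest ih =>
    simp only [List.map_cons, pvAuxA, pvTakeBlock]
    by_cases h1 : PySem.Str.startswith (PySem.Str.strip l) "## Evaluation" = true
    · simp only [h1, Bool.not_true, Bool.and_false, Bool.false_eq_true, if_false, if_true,
        List.foldl_cons, pvParse_header _ h1, ih]
    · rw [Bool.not_eq_true] at h1
      by_cases h2 : PySem.Str.startswith (PySem.Str.strip l) "## " = true
      · simp only [h1, h2, Bool.not_false, Bool.and_true, Bool.false_eq_true, Bool.not_true,
          if_false, if_true, List.foldl_nil]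
      · rw [Bool.not_eq_true] at h2
        simp only [h1, h2, Bool.true_and, Bool.false_and, Bool.not_true, Bool.false_eq_true,
          if_false, List.foldl_cons]
        unfold pvParse
        split_ifs <;> exact ih _ _ _

-- before the section, A skips lines exactly while pvFindRest searches
theorem pv_pre_phase (ls : List String) (c m t : String) :
    pvAuxA ls c m t false =
      match pvFindRest (ls.map PySem.Str.strip) with
      | none => (c, m, t)
      | some rest => (pvTakeBlock rest).foldl pvParse (c, m, t) := by
  induction ls with
  | nil => rfl
  | cons l rest ih =>
    simp only [List.map_cons, pvAuxA, pvFindRest]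
    by_cases h1 : PySem.Str.startswith (PySem.Str.strip l) "## Evaluation" = true
    · simp only [h1, if_true, pv_eval_phase]
    · rw [Bool.not_eq_true] at h1
      simp only [h1, Bool.false_and, Bool.not_false, Bool.false_eq_true, if_false, if_true, ih]

-- ===== VERDICT (by name: the statement is the Claim_ definition above) =====
theorem extract_evaluation_py_spec : Claim_equal_extract_evaluation_py := by
  intro text _
  unfold Spec_extract_evaluation_py extract_evaluation_py extract_evaluation_py_alt
  rw [pv_pre_phase]
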